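-- pv_equiv track=rewrite | github.com/elhamdaoui/Pada-Python-application-HM-for-Finished-automata | convertion_re_en_automate.py | diviser_fermeture_kleene
-- ===== SOURCE A (Python) =====
-- def diviser_fermeture_kleene(r):
--     """
--     méthode qui permette de diviser une expression régulière sous forme du
--     fermeture de kleene des plusieurs regExpressions.
--     """
--     #r=self.supprimer_parentheses(r)#supprimer les parenthéses depart fin s'ils est unitules.
--     exprs=list()#la liste à retourner
--     nb_para=0#le nombre de paranthéses.
--     ch,i="",0
--     for l in r:
--         ch+=l
--         if l=='(':nb_para+=1
--         if l==')':nb_para-=1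
--         if l=='*':
--             if nb_para==0:
--                 ch=ch[:-1]
--                 exprs.append(ch)
--                 exprs.append('*')
--                 ch=""
--     if len(exprs)==0:exprs.append(r)
--     #exprs=[self.supprimer_parentheses(ch) for ch in exprs]#supprimer les parenthéses unitules
--     return exprs
-- ===== SOURCE B (Python) =====
-- def diviser_fermeture_kleene(r):
--     stars = []
--     depth = 0
--     for i, l in enumerate(r):
--         if l == '(':
--             depth += 1
--         elif l == ')':
--             depth -= 1
--         elif l == '*' and depth == 0:
--             stars.append(i)
--     if not stars:
--         return [r]
--     exprs = []
--     prev = 0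
--     for i in stars:
--         exprs.append(r[prev:i])
--         exprs.append('*')
--         prev = i + 1
--     return exprs
-- ===== Notes on version B (the rewrite author's own statement) =====
-- stated objective: alternative
-- what changed: Replaces A's single pass that accumulates characters into a growing chunk string with a two-pass scheme: first collect the indices of top-level stars while tracking depth, then emit slices r[prev:i] between consecutive star indices.
import Mathlib
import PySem

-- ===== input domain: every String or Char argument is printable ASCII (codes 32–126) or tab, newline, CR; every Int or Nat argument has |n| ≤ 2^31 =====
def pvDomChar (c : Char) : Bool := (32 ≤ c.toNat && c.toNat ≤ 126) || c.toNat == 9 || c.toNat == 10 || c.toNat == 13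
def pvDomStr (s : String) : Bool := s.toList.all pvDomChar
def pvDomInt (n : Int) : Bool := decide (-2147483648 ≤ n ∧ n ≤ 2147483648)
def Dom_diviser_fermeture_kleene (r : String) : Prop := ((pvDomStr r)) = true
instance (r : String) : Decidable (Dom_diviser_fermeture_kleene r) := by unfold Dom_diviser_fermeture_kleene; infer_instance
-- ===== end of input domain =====

-- B replaces A's chunk-accumulating single pass by an index-collecting pass plus a slicing pass (alternative decomposition, same cost).

-- ===== PORT A =====
-- loop body of A's `for l in r`; state: (exprs, nb_para, ch)
def stepA (st : List String × Int × List Char) (l : Char) : List String × Int × List Char :=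
  let exprs := st.1
  let nb := st.2.1
  let ch := st.2.2 ++ [l]
  let nb := if l = '(' then nb + 1 else nb
  let nb := if l = ')' then nb - 1 else nb
  if l = '*' ∧ nb = 0 then
    (exprs ++ [String.ofList (PySem.List.slice ch none (some (-1))), "*"], nb, [])
  else (exprs, nb, ch)

def diviser_fermeture_kleene (r : String) : List String :=
  let st := r.toList.foldl stepA ([], 0, [])
  if st.1.length = 0 then [r] else st.1

-- ===== PORT B =====
-- loop body of B's first pass; state: (stars, depth)
def stepB1 (st : List Int × Int) (p : Int × Char) : List Int × Int :=
  if p.2 = '(' then (st.1, st.2 + 1)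
  else if p.2 = ')' then (st.1, st.2 - 1)
  else if p.2 = '*' ∧ st.2 = 0 then (st.1 ++ [p.1], st.2)
  else st

-- loop body of B's second pass over the star indices; state: (exprs, prev)
def stepB2 (cs : List Char) (st : List String × Int) (i : Int) : List String × Int :=
  (st.1 ++ [String.ofList (PySem.List.slice cs (some st.2) (some i)), "*"], i + 1)

def diviser_fermeture_kleene_alt (r : String) : List String :=
  let cs := r.toList
  let stars := ((PySem.List.enumerate cs 0).foldl stepB1 ([], 0)).1
  if stars = [] then [r]
  else (stars.foldl (stepB2 cs) ([], 0)).1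

-- ===== PRECONDITION & SPEC =====
def Spec_diviser_fermeture_kleene (r : String) (out : List String) : Prop := out = diviser_fermeture_kleene_alt r
instance (r : String) (out : List String) : Decidable (Spec_diviser_fermeture_kleene r out) := by unfold Spec_diviser_fermeture_kleene; infer_instance

-- ===== CLAIM (what is proved, stated in full; the proofs are below) =====
def Claim_equal_diviser_fermeture_kleene : Prop := ∀ (r : String), Dom_diviser_fermeture_kleene r → Spec_diviser_fermeture_kleene r (diviser_fermeture_kleene r)

-- ===== LEMMAS AND PROOFS =====

-- A's paren-depth update for one character
def nbUpd (l : Char) (nb : Int) : Int :=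
  if l = ')' then (if l = '(' then nb + 1 else nb) - 1 else (if l = '(' then nb + 1 else nb)

-- reference recursion for A's fold
def splitRec : List Char → Int → List Char → List String
  | [], _, _ => []
  | l :: cs, nb, ch =>
    if l = '*' ∧ nbUpd l nb = 0 then String.ofList ch :: "*" :: splitRec cs (nbUpd l nb) []
    else splitRec cs (nbUpd l nb) (ch ++ [l])

-- reference recursion for B's first pass (star indices)
def starsRec : List Char → Int → Nat → List Int
  | [], _, _ => []
  | l :: cs, d, k =>
    if l = '(' then starsRec cs (d + 1) (k + 1)
    else if l = ')' then starsRec cs (d - 1) (k + 1)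
    else if l = '*' ∧ d = 0 then (k : Int) :: starsRec cs d (k + 1)
    else starsRec cs d (k + 1)

-- reference recursion for B's second pass
def pass2 (cs0 : List Char) : List Int → Int → List String
  | [], _ => []
  | i :: is, prev => String.ofList (PySem.List.slice cs0 (some prev) (some i)) :: "*" :: pass2 cs0 is (i + 1)

theorem stepA_eq (st : List String × Int × List Char) (l : Char) :
    stepA st l = if l = '*' ∧ nbUpd l st.2.1 = 0 then
      (st.1 ++ [String.ofList st.2.2, "*"], nbUpd l st.2.1, [])
    else (st.1, nbUpd l st.2.1, st.2.2 ++ [l]) := by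
  simp only [stepA, nbUpd, PySem.List.slice_to_neg_one, List.dropLast_concat]

theorem foldlA_eq (cs : List Char) : ∀ (exprs : List String) (nb : Int) (ch : List Char),
    (cs.foldl stepA (exprs, nb, ch)).1 = exprs ++ splitRec cs nb ch := by
  induction cs with
  | nil => intro exprs nb ch; simp [splitRec]
  | cons l cs ih =>
    intro exprs nb ch
    rw [List.foldl_cons, stepA_eq]
    by_cases hs : l = '*' ∧ nbUpd l nb = 0
    · rw [if_pos hs, ih]
      simp only [splitRec]
      rw [if_pos hs]
      simp
    · rw [if_neg hs, ih]
      simp only [splitRec]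
      rw [if_neg hs]

theorem foldlB1_eq (cs : List Char) : ∀ (stars : List Int) (d : Int) (k : Nat),
    ((PySem.List.enumerate cs (k : Int)).foldl stepB1 (stars, d)).1 = stars ++ starsRec cs d k := by
  induction cs with
  | nil => intro stars d k; simp [starsRec, PySem.List.enumerate_nil]
  | cons l cs ih =>
    intro stars d k
    rw [PySem.List.enumerate_cons, List.foldl_cons]
    have hk : ((k : Int) + 1) = ((k + 1 : Nat) : Int) := by push_cast; ring
    by_cases h1 : l = '('
    · rw [show stepB1 (stars, d) ((k : Int), l) = (stars, d + 1) by simp [stepB1, h1], hk, ih]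
      simp [starsRec, h1]
    · by_cases h2 : l = ')'
      · rw [show stepB1 (stars, d) ((k : Int), l) = (stars, d - 1) by simp [stepB1, h1, h2], hk, ih]
        simp [starsRec, h1, h2]
      · by_cases h3 : l = '*' ∧ d = 0
        · rw [show stepB1 (stars, d) ((k : Int), l) = (stars ++ [(k : Int)], d) by simp [stepB1, h1, h2, h3], hk, ih]
          simp [starsRec, h1, h2, h3]
        · rw [show stepB1 (stars, d) ((k : Int), l) = (stars, d) by simp [stepB1, h1, h2, h3], hk, ih]
          simp [starsRec, h1, h2, h3]

theorem foldlB2_eq (cs0 : List Char) (is : List Int) : ∀ (acc : List String) (prev : Int),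
    (is.foldl (stepB2 cs0) (acc, prev)).1 = acc ++ pass2 cs0 is prev := by
  induction is with
  | nil => intro acc prev; simp [pass2]
  | cons i is ih => intro acc prev; rw [List.foldl_cons]; simp only [stepB2, ih, pass2]; simp

theorem main_lemma (cs : List Char) : ∀ (d : Int) (prev k : Nat) (cs0 : List Char),
    cs0.drop k = cs → prev ≤ k →
    splitRec cs d ((cs0.take k).drop prev) = pass2 cs0 (starsRec cs d k) (prev : Int) := by
  induction cs with
  | nil => intro d prev k cs0 _ _; simp [splitRec, starsRec, pass2]
  | cons l cs ih =>
    intro d prev k cs0 hdrop hle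
    have hklen : k < cs0.length := by
      by_contra h
      rw [List.drop_eq_nil_of_le (by omega)] at hdrop
      exact List.cons_ne_nil _ _ hdrop.symm
    have hcons := List.drop_eq_getElem_cons hklen
    rw [hdrop] at hcons
    obtain ⟨hg, hd⟩ := List.cons.inj hcons
    have hget : cs0[k] = l := hg.symm
    have hdrop' : cs0.drop (k + 1) = cs := hd.symm
    have htake : cs0.take (k + 1) = cs0.take k ++ [l] := by
      rw [List.take_succ]
      simp [List.getElem?_eq_getElem hklen, hget]
    have hch : (cs0.take (k + 1)).drop prev = (cs0.take k).drop prev ++ [l] := by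
      rw [htake, List.drop_append_of_le_length (by simp; omega)]
    have hnb : ∀ b : Int, nbUpd l b = if l = '(' then b + 1 else if l = ')' then b - 1 else b := by
      intro b
      unfold nbUpd
      by_cases h1 : l = '('
      · subst h1; simp
      · by_cases h2 : l = ')'
        · subst h2; simp
        · simp [h1, h2]
    by_cases h1 : l = '('
    · rw [show splitRec (l :: cs) d ((cs0.take k).drop prev)
            = splitRec cs (d + 1) ((cs0.take (k+1)).drop prev) by
          rw [splitRec, hnb, hch]; simp [h1]]
      rw [show starsRec (l :: cs) d k = starsRec cs (d + 1) (k + 1) by rw [starsRec]; simp [h1]]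
      exact ih (d + 1) prev (k + 1) cs0 hdrop' (by omega)
    · by_cases h2 : l = ')'
      · rw [show splitRec (l :: cs) d ((cs0.take k).drop prev)
              = splitRec cs (d - 1) ((cs0.take (k+1)).drop prev) by
            rw [splitRec, hnb, hch]; simp [h1, h2]]
        rw [show starsRec (l :: cs) d k = starsRec cs (d - 1) (k + 1) by rw [starsRec]; simp [h1, h2]]
        exact ih (d - 1) prev (k + 1) cs0 hdrop' (by omega)
      · by_cases h3 : l = '*' ∧ d = 0
        · rw [show starsRec (l :: cs) d k = (k : Int) :: starsRec cs d (k + 1) by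
              rw [starsRec]; simp [h1, h2, h3]]
          rw [show splitRec (l :: cs) d ((cs0.take k).drop prev)
                = String.ofList ((cs0.take k).drop prev) :: "*" :: splitRec cs d [] by
              rw [splitRec, hnb]; simp [h1, h2, h3]]
          rw [pass2]
          have hslice : PySem.List.slice cs0 (some (prev : Int)) (some (k : Int))
              = (cs0.take k).drop prev := by
            rw [PySem.List.slice_natCast, List.drop_take]
          rw [hslice]
          have hempty : (cs0.take (k + 1)).drop (k + 1) = [] := by
            apply List.drop_eq_nil_of_le; simp
          have := ih d (k + 1) (k + 1) cs0 hdrop' (le_refl _)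
          rw [hempty] at this
          rw [this]
          simp
        · rw [show splitRec (l :: cs) d ((cs0.take k).drop prev)
                = splitRec cs d ((cs0.take (k+1)).drop prev) by
              rw [splitRec, hnb, hch]; simp [h1, h2, h3]]
          rw [show starsRec (l :: cs) d k = starsRec cs d (k + 1) by
              rw [starsRec]; simp [h1, h2, h3]]
          exact ih d prev (k + 1) cs0 hdrop' (by omega)

theorem pass2_eq_nil_iff (cs0 : List Char) (is : List Int) (prev : Int) :
    pass2 cs0 is prev = [] ↔ is = [] := by
  cases is <;> simp [pass2]

-- ===== VERDICT (by name: the statement is the Claim_ definition above) =====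
theorem diviser_fermeture_kleene_spec : Claim_equal_diviser_fermeture_kleene := by
  intro r _
  unfold Spec_diviser_fermeture_kleene diviser_fermeture_kleene diviser_fermeture_kleene_alt
  have hA := foldlA_eq r.toList [] 0 []
  have hB1 := foldlB1_eq r.toList [] 0 0
  have hB2 := foldlB2_eq r.toList (starsRec r.toList 0 0) [] 0
  have hmain := main_lemma r.toList 0 0 0 r.toList (by simp) (le_refl _)
  simp only [List.nil_append] at hA hB1 hB2
  simp only [Nat.cast_zero] at hB1 hmain
  simp only [hA, hB1, hB2]
  simp only [List.take_zero, List.drop_nil] at hmain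
  by_cases h : starsRec r.toList 0 0 = []
  · rw [if_pos h]
    have : splitRec r.toList 0 [] = [] := by
      rw [hmain, h, pass2]
    rw [this]
    simp
  · rw [if_neg h]
    have : splitRec r.toList 0 [] ≠ [] := by
      rw [hmain]; rw [Ne, pass2_eq_nil_iff]; exact h
    rw [hmain]
    rw [if_neg (by simpa [List.length_eq_zero_iff, hmain] using this)]
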